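-- pv_equiv track=rewrite | github.com/bmuralid/Pure-Fortran | xfind_pointer.py | strip_strings
-- ===== SOURCE A (Python) =====
-- def strip_strings(s: str) -> str:
--     out = []
--     i = 0
--     in_single = False
--     in_double = False
--     while i < len(s):
--         ch = s[i]
--         if in_single:
--             if ch == "'":
--                 if i + 1 < len(s) and s[i + 1] == "'":
--                     i += 1
--                 else:
--                     in_single = False
--             i += 1
--             continue
--         if in_double:
--             if ch == '"':
--                 if i + 1 < len(s) and s[i + 1] == '"':
--                     i += 1
--                 else:
--                     in_double = False
--             i += 1
--             continue
--         if ch == "'":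
--             in_single = True
--             out.append(" ")
--         elif ch == '"':
--             in_double = True
--             out.append(" ")
--         else:
--             out.append(ch)
--         i += 1
--     return "".join(out)
-- ===== SOURCE B (Python) =====
-- def _next_quote(t):
--     j1 = t.find("'")
--     j2 = t.find('"')
--     if j1 < 0:
--         j1 = len(t)
--     if j2 < 0:
--         j2 = len(t)
--     return min(j1, j2)
--
--
-- def _skip_literal(t, q):
--     # t is the text after an opening quote q; return the remainder after the literal
--     while True:
--         k = t.find(q)
--         if k < 0:
--             return ''
--         if t[k + 1:k + 2] == q:
--             t = t[k + 2:]
--         else: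
--             return t[k + 1:]
--
--
-- def strip_strings(s: str) -> str:
--     out = []
--     rest = s
--     while rest:
--         j = _next_quote(rest)
--         out.append(rest[:j])
--         if j == len(rest):
--             break
--         out.append(' ')
--         rest = _skip_literal(rest[j + 1:], rest[j])
--     return ''.join(out)
-- ===== Notes on version B (the rewrite author's own statement) =====
-- stated objective: faster
-- what changed: Replaces the per-character boolean state machine (index loop with in_single/in_double flags and one-char lookahead) by chunk processing: str.find jumps to the next quote, the quote-free chunk is copied wholesale, and a find-based helper skips each literal handling doubled quotes.
import Mathlib
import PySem

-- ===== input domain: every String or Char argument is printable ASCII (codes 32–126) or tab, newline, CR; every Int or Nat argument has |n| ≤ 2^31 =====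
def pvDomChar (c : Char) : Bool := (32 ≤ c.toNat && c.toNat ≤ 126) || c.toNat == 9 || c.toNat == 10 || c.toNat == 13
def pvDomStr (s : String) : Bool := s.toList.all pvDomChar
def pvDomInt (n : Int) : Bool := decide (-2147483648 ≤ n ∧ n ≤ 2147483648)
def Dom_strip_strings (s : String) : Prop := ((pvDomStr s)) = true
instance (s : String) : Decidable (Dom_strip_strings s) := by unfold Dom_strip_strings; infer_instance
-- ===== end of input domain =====

-- B replaces A's per-character boolean state machine by find-based chunk processing
-- (copy up to the next quote, then skip the whole literal); a timing run measured B faster (C-level find/slices).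

-- ===== PORT A =====
-- the while loop over index i, advancing by 1 or 2, as recursion on the remaining suffix
def stripAGo : List Char → Bool → Bool → List Char → List Char
  | [], _, _, out => out
  | ch :: rest, insg, indb, out =>
    if insg then
      if ch = '\'' then
        match rest with
        | c2 :: rest2 =>
          if c2 = '\'' then stripAGo rest2 insg indb out
          else stripAGo (c2 :: rest2) false indb out
        | [] => stripAGo [] false indb out
      else stripAGo rest insg indb out
    else if indb then
      if ch = '"' then
        match rest with
        | c2 :: rest2 =>
          if c2 = '"' then stripAGo rest2 insg indb out
          else stripAGo (c2 :: rest2) insg false out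
        | [] => stripAGo [] insg false out
      else stripAGo rest insg indb out
    else if ch = '\'' then stripAGo rest true indb (out ++ [' '])
    else if ch = '"' then stripAGo rest insg true (out ++ [' '])
    else stripAGo rest insg indb (out ++ [ch])
  termination_by cs _ _ _ => cs.length
  decreasing_by all_goals simp

def strip_strings (s : String) : String := String.ofList (stripAGo s.toList false false [])

-- ===== PORT B =====
-- _skip_literal: jump with find to successive closing-quote candidates
def pvSkipLit (t : List Char) (q : Char) : List Char :=
  let k := PySem.Chars.find t [q]
  if k < 0 then []
  else if PySem.List.slice t (some (k + 1)) (some (k + 2)) = [q] then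
    pvSkipLit (t.drop (k.toNat + 2)) q
  else t.drop (k.toNat + 1)
  termination_by t.length
  decreasing_by
    rename_i h1 _
    have h0 : 0 ≤ PySem.Chars.find t [q] := by omega
    have hin : [q] <:+: t := (PySem.Chars.find_nonneg_iff t [q]).mp h0
    obtain ⟨u, v, huv⟩ := hin
    have : 0 < t.length := by
      subst huv; simp
    simp [List.length_drop]; omega

-- _next_quote: the nearer of the two find results (len if absent)
def pvNextQuote (t : List Char) : Int :=
  let j1 := PySem.Chars.find t ['\'']
  let j2 := PySem.Chars.find t ['"']
  let j1' := if j1 < 0 then (t.length : Int) else j1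
  let j2' := if j2 < 0 then (t.length : Int) else j2
  min j1' j2'

lemma pvNextQuote_nonneg (t : List Char) : 0 ≤ pvNextQuote t := by
  unfold pvNextQuote
  have h1 := PySem.Chars.neg_one_le_find t ['\'']
  have h2 := PySem.Chars.neg_one_le_find t ['"']
  simp only [le_min_iff]
  constructor <;> split <;> omega

lemma pvSkipLit_length_le (t : List Char) (q : Char) : (pvSkipLit t q).length ≤ t.length := by
  fun_induction pvSkipLit t q with
  | case1 => simp
  | case2 => rename_i ih; simp [List.length_drop] at ih ⊢; omega
  | case3 => simp [List.length_drop]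

-- outer loop: copy the quote-free chunk, blank the quote, skip the literal
def pvStripLoop (rest : List Char) (out : List Char) : List Char :=
  match hrest : rest with
  | [] => out
  | _ :: _ =>
    let j := pvNextQuote rest
    let out' := out ++ PySem.List.slice rest none (some j)
    if j = (rest.length : Int) then out'
    else
      let q := PySem.List.pyGetD rest j ' '
      pvStripLoop (pvSkipLit (PySem.List.slice rest (some (j + 1)) none) q) (out' ++ [' '])
  termination_by rest.length
  decreasing_by
    have hj : 0 ≤ pvNextQuote rest := pvNextQuote_nonneg _
    have h1 : 1 ≤ (pvNextQuote rest + 1).toNat := by omega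
    rw [hrest] at hj h1 ⊢
    rw [PySem.List.slice_from _ (by omega)]
    refine lt_of_le_of_lt (pvSkipLit_length_le _ _) ?_
    simp [List.length_drop]
    omega

def strip_strings_alt (s : String) : String := String.ofList (pvStripLoop s.toList [])

-- ===== PRECONDITION & SPEC =====
def Spec_strip_strings (s : String) (out : String) : Prop := out = strip_strings_alt s
instance (s : String) (out : String) : Decidable (Spec_strip_strings s out) := by unfold Spec_strip_strings; infer_instance

-- ===== CLAIM (what is proved, stated in full; the proofs are below) =====
def Claim_equal_strip_strings : Prop := ∀ (s : String), Dom_strip_strings s → Spec_strip_strings s (strip_strings s)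

-- ===== LEMMAS AND PROOFS =====

-- one-step equations for A's state machine
lemma pv_sA_other (c : Char) (l out : List Char) (h1 : c ≠ '\'') (h2 : c ≠ '"') :
    stripAGo (c :: l) false false out = stripAGo l false false (out ++ [c]) := by
  rw [stripAGo.eq_def]; simp [h1, h2]

lemma pv_sA_openS (l out : List Char) :
    stripAGo ('\'' :: l) false false out = stripAGo l true false (out ++ [' ']) := by
  rw [stripAGo.eq_def]; simp

lemma pv_sA_openD (l out : List Char) :
    stripAGo ('"' :: l) false false out = stripAGo l false true (out ++ [' ']) := by
  rw [stripAGo.eq_def]; simp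

lemma pv_sA_inS_other (c : Char) (l out : List Char) (h1 : c ≠ '\'') :
    stripAGo (c :: l) true false out = stripAGo l true false out := by
  rw [stripAGo.eq_def]; simp [h1]

lemma pv_sA_inS_qq (l out : List Char) :
    stripAGo ('\'' :: '\'' :: l) true false out = stripAGo l true false out := by
  rw [stripAGo.eq_def]; simp

lemma pv_sA_inS_q_other (c2 : Char) (l out : List Char) (hc2 : c2 ≠ '\'') :
    stripAGo ('\'' :: c2 :: l) true false out = stripAGo (c2 :: l) false false out := by
  rw [stripAGo.eq_def]; simp [hc2]

lemma pv_sA_inS_q_nil (out : List Char) : stripAGo ['\''] true false out = out := by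
  rw [stripAGo.eq_def]; simp [stripAGo]

lemma pv_sA_inD_other (c : Char) (l out : List Char) (h1 : c ≠ '"') :
    stripAGo (c :: l) false true out = stripAGo l false true out := by
  rw [stripAGo.eq_def]; simp [h1]

lemma pv_sA_inD_qq (l out : List Char) :
    stripAGo ('"' :: '"' :: l) false true out = stripAGo l false true out := by
  rw [stripAGo.eq_def]; simp

lemma pv_sA_inD_q_other (c2 : Char) (l out : List Char) (hc2 : c2 ≠ '"') :
    stripAGo ('"' :: c2 :: l) false true out = stripAGo (c2 :: l) false false out := by
  rw [stripAGo.eq_def]; simp [hc2]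

lemma pv_sA_inD_q_nil (out : List Char) : stripAGo ['"'] false true out = out := by
  rw [stripAGo.eq_def]; simp [stripAGo]

-- generic facts about singleton find
lemma pv_singleton_prefix_iff (q : Char) (u : List Char) : [q] <+: u ↔ u.head? = some q := by
  cases u with
  | nil => simp
  | cons c u => simp [List.cons_prefix_cons, eq_comm]

lemma pv_singleton_infix_iff (q : Char) (u : List Char) : [q] <:+: u ↔ q ∈ u := by
  constructor
  · intro h
    exact h.sublist.subset (List.mem_singleton_self q)
  · intro h
    obtain ⟨s, t, rfl⟩ := List.append_of_mem h
    exact ⟨s, t, by simp⟩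

lemma pv_mem_take_get (l : List Char) (n : Nat) (c : Char) (h : c ∈ l.take n) :
    ∃ i, i < n ∧ l[i]? = some c := by
  obtain ⟨i, hi, hget⟩ := List.getElem_of_mem h
  have hlen : i < min n l.length := by simpa using hi
  have h1 : i < n := lt_of_lt_of_le hlen (min_le_left _ _)
  have h2 : i < l.length := lt_of_lt_of_le hlen (min_le_right _ _)
  refine ⟨i, h1, ?_⟩
  rw [List.getElem?_eq_getElem h2]
  rw [← hget, List.getElem_take]

lemma pv_find_char_none (t : List Char) (q : Char) (h : PySem.Chars.find t [q] < 0) :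
    q ∉ t := by
  have h1 := PySem.Chars.neg_one_le_find t [q]
  have h2 : PySem.Chars.find t [q] = -1 := by omega
  have := (PySem.Chars.find_eq_neg_one_iff t [q]).mp h2
  intro hmem
  exact this ((pv_singleton_infix_iff q t).mpr hmem)

lemma pv_find_char_found (t : List Char) (q : Char) (h : ¬ PySem.Chars.find t [q] < 0) :
    (PySem.Chars.find t [q]).toNat < t.length ∧
    t[(PySem.Chars.find t [q]).toNat]? = some q ∧
    ∀ i < (PySem.Chars.find t [q]).toNat, t[i]? ≠ some q := by
  have h0 : 0 ≤ PySem.Chars.find t [q] := by omega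
  obtain ⟨hpre, hfirst⟩ := PySem.Chars.find_spec h0
  have hget : t[(PySem.Chars.find t [q]).toNat]? = some q := by
    rw [← List.head?_drop]
    exact (pv_singleton_prefix_iff _ _).mp hpre
  refine ⟨?_, hget, ?_⟩
  · by_contra hge
    rw [List.getElem?_eq_none (by omega)] at hget
    simp at hget
  · intro i hi hgi
    exact hfirst i hi ((pv_singleton_prefix_iff _ _).mpr (by rw [List.head?_drop]; exact hgi))

-- characterisation of pvNextQuote
lemma pv_nq_spec (t : List Char) :
    (pvNextQuote t).toNat ≤ t.length ∧
    (∀ i < (pvNextQuote t).toNat, t[i]? ≠ some '\'' ∧ t[i]? ≠ some '"') ∧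
    ((pvNextQuote t).toNat < t.length →
      t[(pvNextQuote t).toNat]? = some '\'' ∨ t[(pvNextQuote t).toNat]? = some '"') ∧
    (pvNextQuote t = (t.length : Int) ∨ (pvNextQuote t).toNat < t.length) := by
  have hl1 := PySem.Chars.find_le_length t ['\'']
  have hl2 := PySem.Chars.find_le_length t ['"']
  have hn1 := PySem.Chars.neg_one_le_find t ['\'']
  have hn2 := PySem.Chars.neg_one_le_find t ['"']
  by_cases h1 : PySem.Chars.find t ['\''] < 0 <;> by_cases h2 : PySem.Chars.find t ['"'] < 0
  · -- both absent
    have hval : pvNextQuote t = (t.length : Int) := by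
      simp [pvNextQuote, h1, h2]
    have m1 := pv_find_char_none t '\'' h1
    have m2 := pv_find_char_none t '"' h2
    rw [hval]
    refine ⟨by omega, ?_, ?_, by omega⟩
    · intro i _
      exact ⟨fun hg => m1 (List.mem_of_getElem? hg), fun hg => m2 (List.mem_of_getElem? hg)⟩
    · intro hlt; omega
  · -- only double quote present
    obtain ⟨k2lt, k2get, k2first⟩ := pv_find_char_found t '"' h2
    have m1 := pv_find_char_none t '\'' h1
    have hval : pvNextQuote t = PySem.Chars.find t ['"'] := by
      simp [pvNextQuote, h1, h2]
      omega
    rw [hval]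
    refine ⟨by omega, ?_, fun _ => Or.inr k2get, by omega⟩
    intro i hi
    exact ⟨fun hg => m1 (List.mem_of_getElem? hg), k2first i hi⟩
  · -- only single quote present
    obtain ⟨k1lt, k1get, k1first⟩ := pv_find_char_found t '\'' h1
    have m2 := pv_find_char_none t '"' h2
    have hval : pvNextQuote t = PySem.Chars.find t ['\''] := by
      simp [pvNextQuote, h1, h2]
      omega
    rw [hval]
    refine ⟨by omega, ?_, fun _ => Or.inl k1get, by omega⟩
    intro i hi
    exact ⟨k1first i hi, fun hg => m2 (List.mem_of_getElem? hg)⟩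
  · -- both present
    obtain ⟨k1lt, k1get, k1first⟩ := pv_find_char_found t '\'' h1
    obtain ⟨k2lt, k2get, k2first⟩ := pv_find_char_found t '"' h2
    have hval : pvNextQuote t = min (PySem.Chars.find t ['\'']) (PySem.Chars.find t ['"']) := by
      simp [pvNextQuote, h1, h2]
    rw [hval]
    rcases le_total (PySem.Chars.find t ['\'']) (PySem.Chars.find t ['"']) with hle | hle
    · rw [min_eq_left hle]
      refine ⟨by omega, ?_, fun _ => Or.inl k1get, by omega⟩
      intro i hi
      exact ⟨k1first i hi, k2first i (by omega)⟩
    · rw [min_eq_right hle]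
      refine ⟨by omega, ?_, fun _ => Or.inr k2get, by omega⟩
      intro i hi
      exact ⟨k1first i (by omega), k2first i hi⟩

-- A copies a quote-free prefix verbatim in normal mode
lemma pv_A_copy (pre rest out : List Char) (h : ∀ c ∈ pre, c ≠ '\'' ∧ c ≠ '"') :
    stripAGo (pre ++ rest) false false out = stripAGo rest false false (out ++ pre) := by
  induction pre generalizing out with
  | nil => simp
  | cons c pre ih =>
    obtain ⟨h1, h2⟩ := h c (List.mem_cons_self ..)
    rw [List.cons_append, pv_sA_other c _ _ h1 h2]
    rw [ih _ (fun d hd => h d (List.mem_cons_of_mem _ hd))]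
    simp

-- A drops a q-free prefix while inside a q-literal
lemma pv_A_skipS (pre rest out : List Char) (h : ∀ c ∈ pre, c ≠ '\'') :
    stripAGo (pre ++ rest) true false out = stripAGo rest true false out := by
  induction pre with
  | nil => simp
  | cons c pre ih =>
    rw [List.cons_append, pv_sA_inS_other c _ _ (h c (List.mem_cons_self ..))]
    exact ih (fun d hd => h d (List.mem_cons_of_mem _ hd))

lemma pv_A_skipD (pre rest out : List Char) (h : ∀ c ∈ pre, c ≠ '"') :
    stripAGo (pre ++ rest) false true out = stripAGo rest false true out := by
  induction pre with
  | nil => simp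
  | cons c pre ih =>
    rw [List.cons_append, pv_sA_inD_other c _ _ (h c (List.mem_cons_self ..))]
    exact ih (fun d hd => h d (List.mem_cons_of_mem _ hd))

-- pvSkipLit computes exactly the remainder at which A leaves a single-quote literal
lemma pv_skip_single : ∀ (n : Nat) (t out : List Char), t.length ≤ n →
    stripAGo t true false out = stripAGo (pvSkipLit t '\'') false false out := by
  intro n
  induction n with
  | zero =>
    intro t out hle
    have ht : t = [] := List.eq_nil_of_length_eq_zero (by omega)
    subst ht
    rw [pvSkipLit]
    by_cases h : PySem.Chars.find ([] : List Char) ['\''] < 0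
    · simp [h, stripAGo]
    · obtain ⟨hlt, _, _⟩ := pv_find_char_found _ _ h
      simp at hlt
  | succ n ih =>
    intro t out hle
    rw [pvSkipLit]
    by_cases h : PySem.Chars.find t ['\''] < 0
    · simp only [if_pos h]
      have hnot := pv_find_char_none t '\'' h
      have := pv_A_skipS t [] out (fun c hc hq => hnot (hq ▸ hc))
      simpa [stripAGo] using this
    · simp only [if_neg h]
      obtain ⟨hlt, hget, hfirst⟩ := pv_find_char_found t '\'' h
      set k := (PySem.Chars.find t ['\'']).toNat with hk
      have hget' : t[k] = '\'' := by
        have he := List.getElem?_eq_getElem hlt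
        rw [he] at hget
        injection hget
      have hdecomp : t = t.take k ++ '\'' :: t.drop (k+1) := by
        conv_lhs => rw [← List.take_append_drop k t]
        rw [List.drop_eq_getElem_cons hlt, hget']
      have hfree : ∀ c ∈ t.take k, c ≠ '\'' := by
        intro c hc hq
        obtain ⟨i, hi, hgi⟩ := pv_mem_take_get t k c hc
        exact hfirst i hi (hq ▸ hgi)
      have e1 : (PySem.Chars.find t ['\''] + 2).toNat - (PySem.Chars.find t ['\''] + 1).toNat = 1 := by omega
      have e2 : (PySem.Chars.find t ['\''] + 1).toNat = k + 1 := by omega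
      have hslice : PySem.List.slice t (some (PySem.Chars.find t ['\''] + 1)) (some (PySem.Chars.find t ['\''] + 2)) =
          (t.drop (k+1)).take 1 := by
        rw [PySem.List.slice_toNat t (by omega) (by omega), e1, e2]
      have hdlen : t.length - (k + 1) = (t.drop (k+1)).length := (List.length_drop ..).symm
      conv_lhs => rw [hdecomp]
      rw [pv_A_skipS _ _ _ hfree]
      cases hu : t.drop (k+1) with
      | nil =>
        rw [hu] at hslice
        simp only [List.take_nil] at hslice
        rw [if_neg (by rw [hslice]; simp)]
        simp [pv_sA_inS_q_nil, stripAGo]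
      | cons c2 u2 =>
        have hulen : u2.length + 1 = t.length - (k + 1) := by
          rw [hdlen, hu]; simp
        have hu2 : u2 = t.drop (k+2) := by
          have := congrArg List.tail hu
          simpa [List.tail_drop, show k + 1 + 1 = k + 2 from rfl] using this.symm
        by_cases hc2 : c2 = '\''
        · subst hc2
          rw [hu] at hslice
          rw [if_pos (by rw [hslice]; simp)]
          rw [pv_sA_inS_qq]
          rw [← hu2]
          exact ih u2 out (by omega)
        · rw [hu] at hslice
          rw [if_neg (by rw [hslice]; simp [hc2])]
          exact pv_sA_inS_q_other c2 u2 out hc2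

lemma pv_skip_double : ∀ (n : Nat) (t out : List Char), t.length ≤ n →
    stripAGo t false true out = stripAGo (pvSkipLit t '"') false false out := by
  intro n
  induction n with
  | zero =>
    intro t out hle
    have ht : t = [] := List.eq_nil_of_length_eq_zero (by omega)
    subst ht
    rw [pvSkipLit]
    by_cases h : PySem.Chars.find ([] : List Char) ['"'] < 0
    · simp [h, stripAGo]
    · obtain ⟨hlt, _, _⟩ := pv_find_char_found _ _ h
      simp at hlt
  | succ n ih =>
    intro t out hle
    rw [pvSkipLit]
    by_cases h : PySem.Chars.find t ['"'] < 0
    · simp only [if_pos h]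
      have hnot := pv_find_char_none t '"' h
      have := pv_A_skipD t [] out (fun c hc hq => hnot (hq ▸ hc))
      simpa [stripAGo] using this
    · simp only [if_neg h]
      obtain ⟨hlt, hget, hfirst⟩ := pv_find_char_found t '"' h
      set k := (PySem.Chars.find t ['"']).toNat with hk
      have hget' : t[k] = '"' := by
        have he := List.getElem?_eq_getElem hlt
        rw [he] at hget
        injection hget
      have hdecomp : t = t.take k ++ '"' :: t.drop (k+1) := by
        conv_lhs => rw [← List.take_append_drop k t]
        rw [List.drop_eq_getElem_cons hlt, hget']
      have hfree : ∀ c ∈ t.take k, c ≠ '"' := by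
        intro c hc hq
        obtain ⟨i, hi, hgi⟩ := pv_mem_take_get t k c hc
        exact hfirst i hi (hq ▸ hgi)
      have e1 : (PySem.Chars.find t ['"'] + 2).toNat - (PySem.Chars.find t ['"'] + 1).toNat = 1 := by omega
      have e2 : (PySem.Chars.find t ['"'] + 1).toNat = k + 1 := by omega
      have hslice : PySem.List.slice t (some (PySem.Chars.find t ['"'] + 1)) (some (PySem.Chars.find t ['"'] + 2)) =
          (t.drop (k+1)).take 1 := by
        rw [PySem.List.slice_toNat t (by omega) (by omega), e1, e2]
      have hdlen : t.length - (k + 1) = (t.drop (k+1)).length := (List.length_drop ..).symm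
      conv_lhs => rw [hdecomp]
      rw [pv_A_skipD _ _ _ hfree]
      cases hu : t.drop (k+1) with
      | nil =>
        rw [hu] at hslice
        simp only [List.take_nil] at hslice
        rw [if_neg (by rw [hslice]; simp)]
        simp [pv_sA_inD_q_nil, stripAGo]
      | cons c2 u2 =>
        have hulen : u2.length + 1 = t.length - (k + 1) := by
          rw [hdlen, hu]; simp
        have hu2 : u2 = t.drop (k+2) := by
          have := congrArg List.tail hu
          simpa [List.tail_drop, show k + 1 + 1 = k + 2 from rfl] using this.symm
        by_cases hc2 : c2 = '"'
        · subst hc2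
          rw [hu] at hslice
          rw [if_pos (by rw [hslice]; simp)]
          rw [pv_sA_inD_qq]
          rw [← hu2]
          exact ih u2 out (by omega)
        · rw [hu] at hslice
          rw [if_neg (by rw [hslice]; simp [hc2])]
          exact pv_sA_inD_q_other c2 u2 out hc2

-- main loop equivalence
lemma pv_main_loop : ∀ (n : Nat) (t out : List Char), t.length ≤ n →
    stripAGo t false false out = pvStripLoop t out := by
  intro n
  induction n with
  | zero =>
    intro t out hle
    have ht : t = [] := List.eq_nil_of_length_eq_zero (by omega)
    subst ht
    simp [stripAGo, pvStripLoop]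
  | succ n ih =>
    intro t out hle
    cases t with
    | nil => simp [stripAGo, pvStripLoop]
    | cons c t' =>
      rw [pvStripLoop]
      obtain ⟨hle', hfree, hat, hcase⟩ := pv_nq_spec (c :: t')
      have hnn := pvNextQuote_nonneg (c :: t')
      set t : List Char := c :: t' with ht
      set j : Int := pvNextQuote t with hj
      have hslice0 : PySem.List.slice t none (some j) = t.take j.toNat :=
        PySem.List.slice_to t hnn
      have hfree' : ∀ d ∈ t.take j.toNat, d ≠ '\'' ∧ d ≠ '"' := by
        intro d hd
        obtain ⟨i, hi, hgi⟩ := pv_mem_take_get t j.toNat d hd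
        obtain ⟨hq1, hq2⟩ := hfree i hi
        exact ⟨fun hq => hq1 (hq ▸ hgi), fun hq => hq2 (hq ▸ hgi)⟩
      rcases hcase with heq | hlt
      · -- no quote: copy everything and stop
        rw [if_pos heq]
        have htake : t.take j.toNat = t := by
          rw [heq]; simp
        have hcopy := pv_A_copy t [] out (htake ▸ hfree')
        simp only [List.append_nil] at hcopy
        rw [hslice0, htake, hcopy]
        simp [stripAGo]
      · -- quote at position j
        have hne : ¬ j = (t.length : Int) := by omega
        rw [if_neg hne]
        have hdecomp : t = t.take j.toNat ++ t[j.toNat] :: t.drop (j.toNat + 1) := by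
          conv_lhs => rw [← List.take_append_drop j.toNat t]
          rw [List.drop_eq_getElem_cons hlt]
        have hgd : PySem.List.pyGetD t j ' ' = t[j.toNat] := by
          rw [PySem.List.pyGetD_of_nonneg t ' ' hnn]
          exact List.getD_eq_getElem t ' ' hlt
        have hslice1 : PySem.List.slice t (some (j + 1)) none = t.drop (j.toNat + 1) := by
          rw [PySem.List.slice_from t (by omega)]
          congr 1; omega
        have hlen1 : (pvSkipLit (t.drop (j.toNat + 1)) t[j.toNat]).length ≤ n := by
          have h1 := pvSkipLit_length_le (t.drop (j.toNat + 1)) t[j.toNat]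
          rw [List.length_drop] at h1
          have h2 : t.length ≤ n + 1 := hle
          omega
        conv_lhs => rw [hdecomp]
        rw [pv_A_copy _ _ _ hfree']
        rw [hslice0, hgd, hslice1]
        have hq := hat hlt
        rw [List.getElem?_eq_getElem hlt] at hq
        rcases hq with hq | hq <;> have hq' := Option.some.inj hq
        · rw [hq', pv_sA_openS]
          rw [pv_skip_single (t.drop (j.toNat + 1)).length _ _ le_rfl]
          exact ih _ _ (hq' ▸ hlen1)
        · rw [hq', pv_sA_openD]
          rw [pv_skip_double (t.drop (j.toNat + 1)).length _ _ le_rfl]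
          exact ih _ _ (hq' ▸ hlen1)

theorem pv_main (t out : List Char) : stripAGo t false false out = pvStripLoop t out :=
  pv_main_loop t.length t out le_rfl

-- ===== VERDICT (by name: the statement is the Claim_ definition above) =====
theorem strip_strings_spec : Claim_equal_strip_strings := by
  intro s _
  unfold Spec_strip_strings strip_strings strip_strings_alt
  exact congrArg String.ofList (pv_main s.toList [])
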